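-- pv_equiv track=rewrite | github.com/EnzoHaegel/slot | Class/Animation.py | calculate_fall_distances
-- ===== SOURCE A (Python) =====
-- def calculate_fall_distances(board):
--     distances = {}
--     for i in range(len(board)):
--         for j in range(len(board[i])):
--             if board[i][j] is not None:
--                 distance = 0
--                 for k in range(i + 1, len(board)):
--                     if board[k][j] is None:
--                         distance += 1
--                 distances[(i, j)] = distance
--     return distances
-- ===== SOURCE B (Python) =====
-- def calculate_fall_distances(board):
--     # One bottom-up pass builds per-column suffix None-counters; then one
--     # row-major pass reads each cell's distance off its row's snapshot.
--     below = []
--     cnt = {}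
--     for row in reversed(board):
--         below.append(dict(cnt))
--         for j, cell in enumerate(row):
--             if cell is None:
--                 cnt[j] = cnt.get(j, 0) + 1
--     below.reverse()
--     distances = {}
--     for i, row in enumerate(board):
--         for j, cell in enumerate(row):
--             if cell is not None:
--                 distances[(i, j)] = below[i].get(j, 0)
--     return distances
-- ===== Notes on version B (the rewrite author's own statement) =====
-- stated objective: faster
-- what changed: B replaces A's per-cell rescan of all rows below by one bottom-up pass that snapshots per-column suffix None-counters, then a single row-major pass that reads each non-None cell's distance from its row's snapshot.
import Mathlib
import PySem

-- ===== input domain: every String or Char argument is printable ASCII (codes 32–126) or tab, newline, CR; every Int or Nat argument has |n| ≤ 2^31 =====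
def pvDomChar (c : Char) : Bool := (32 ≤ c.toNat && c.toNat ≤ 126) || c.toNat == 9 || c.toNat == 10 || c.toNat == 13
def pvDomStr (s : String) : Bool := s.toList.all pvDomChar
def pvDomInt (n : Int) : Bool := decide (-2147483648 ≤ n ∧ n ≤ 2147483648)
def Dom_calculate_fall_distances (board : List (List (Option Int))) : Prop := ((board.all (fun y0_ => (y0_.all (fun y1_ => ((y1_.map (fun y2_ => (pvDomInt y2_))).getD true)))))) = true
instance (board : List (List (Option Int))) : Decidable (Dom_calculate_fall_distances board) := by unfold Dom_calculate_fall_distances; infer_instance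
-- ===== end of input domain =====

-- B computes the same dict with per-column suffix None-counters (one bottom-up pass + one
-- row-major pass) instead of A's per-cell rescan of every row below (measured faster).

-- ===== PORT A =====
def calculate_fall_distances (board : List (List (Option Int))) : List (Int × Int × Int) :=
  let distances : PySem.Dict (Int × Int) Int :=
    (List.range board.length).foldl (fun d i =>
      (List.range (board.getD i []).length).foldl (fun d j =>
        if (board.getD i []).getD j none ≠ none then
          let distance : Int :=
            (List.range' (i + 1) (board.length - (i + 1))).foldl
              (fun dist k => if (board.getD k []).getD j none = none then dist + 1 else dist) 0
          d.insert ((i : Int), (j : Int)) distance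
        else d) d) PySem.Dict.empty
  distances.items.map (fun p => (p.1.1, p.1.2, p.2))

-- ===== PORT B =====
-- the inner counting loop of Source B's first pass (for j, cell in enumerate(row): if cell is None: cnt[j] = cnt.get(j,0)+1)
def cfdCountRow (cnt : PySem.Dict Int Int) (row : List (Option Int)) : PySem.Dict Int Int :=
  (PySem.List.enumerate row).foldl
    (fun cnt p => if p.2 = none then cnt.insert p.1 (cnt.getD p.1 0 + 1) else cnt) cnt

def calculate_fall_distances_alt (board : List (List (Option Int))) : List (Int × Int × Int) :=
  let st := board.reverse.foldl
    (fun (st : List (PySem.Dict Int Int) × PySem.Dict Int Int) row =>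
      (st.1 ++ [st.2], cfdCountRow st.2 row)) ([], PySem.Dict.empty)
  let below := st.1.reverse
  let distances : PySem.Dict (Int × Int) Int :=
    (PySem.List.enumerate board).foldl (fun d p =>
      (PySem.List.enumerate p.2).foldl (fun d q =>
        if q.2 ≠ none then
          d.insert (p.1, q.1) ((below.getD p.1.toNat PySem.Dict.empty).getD q.1 0)
        else d) d) PySem.Dict.empty
  distances.items.map (fun x => (x.1.1, x.1.2, x.2))

-- ===== PRECONDITION & SPEC =====
-- Pre_ is exactly where A returns: A raises IndexError iff some non-None cell (i,j) has a
-- later row of length ≤ j (it reads board[k][j] for every k > i).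
def Pre_calculate_fall_distances (board : List (List (Option Int))) : Prop :=
  ∀ i ∈ List.range board.length, ∀ j ∈ List.range (board.getD i []).length,
    (board.getD i []).getD j none ≠ none →
    ∀ k ∈ List.range board.length, i < k → j < (board.getD k []).length
instance (board : List (List (Option Int))) : Decidable (Pre_calculate_fall_distances board) := by unfold Pre_calculate_fall_distances; infer_instance

def pvWitness_calculate_fall_distances : List (List (Option Int)) :=
  [[some 3, none], [none, some 1], [none, none]]

def Spec_calculate_fall_distances (board : List (List (Option Int))) (out : List (Int × Int × Int)) : Prop := out = calculate_fall_distances_alt board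
instance (board : List (List (Option Int))) (out : List (Int × Int × Int)) : Decidable (Spec_calculate_fall_distances board out) := by unfold Spec_calculate_fall_distances; infer_instance

-- ===== CLAIM (what is proved, stated in full; the proofs are below) =====
def Claim_equal_calculate_fall_distances : Prop := ∀ (board : List (List (Option Int))), Dom_calculate_fall_distances board → Pre_calculate_fall_distances board → Spec_calculate_fall_distances board (calculate_fall_distances board)

-- ===== LEMMAS AND PROOFS =====

-- the list of counter snapshots produced by Source B's first pass, head first
def cfdSnaps (cnt : PySem.Dict Int Int) : List (List (Option Int)) → List (PySem.Dict Int Int)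
  | [] => []
  | r :: rs => cnt :: cfdSnaps (cfdCountRow cnt r) rs

theorem cfdSnaps_fold (rs : List (List (Option Int))) :
    ∀ (snaps : List (PySem.Dict Int Int)) (cnt : PySem.Dict Int Int),
    rs.foldl (fun (st : List (PySem.Dict Int Int) × PySem.Dict Int Int) row =>
      (st.1 ++ [st.2], cfdCountRow st.2 row)) (snaps, cnt)
      = (snaps ++ cfdSnaps cnt rs, rs.foldl cfdCountRow cnt) := by
  induction rs with
  | nil => simp [cfdSnaps]
  | cons r rs ih => intro snaps cnt; simp [cfdSnaps, ih]

theorem cfdSnaps_length (rs : List (List (Option Int))) :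
    ∀ cnt, (cfdSnaps cnt rs).length = rs.length := by
  induction rs with
  | nil => simp [cfdSnaps]
  | cons r rs ih => intro cnt; simp [cfdSnaps, ih]

theorem cfdSnaps_getD (rs : List (List (Option Int))) :
    ∀ (t : Nat) (cnt : PySem.Dict Int Int), t < rs.length →
    (cfdSnaps cnt rs).getD t PySem.Dict.empty = (rs.take t).foldl cfdCountRow cnt := by
  induction rs with
  | nil => intro t cnt h; simp at h
  | cons r rs ih =>
    intro t cnt h
    cases t with
    | zero => simp [cfdSnaps]
    | succ t => simpa [cfdSnaps] using ih t (cfdCountRow cnt r) (by simpa using h)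

theorem cfdCountRow_getD_aux (row : List (Option Int)) :
    ∀ (cnt : PySem.Dict Int Int) (s j : Int),
    ((PySem.List.enumerate row s).foldl
      (fun cnt p => if p.2 = none then cnt.insert p.1 (cnt.getD p.1 0 + 1) else cnt) cnt).getD j 0
    = cnt.getD j 0 + ((PySem.List.enumerate row s).countP (fun p => p.1 == j && p.2 == none) : Int) := by
  induction row with
  | nil => simp [PySem.List.enumerate_nil]
  | cons x row ih =>
    intro cnt s j
    rw [PySem.List.enumerate_cons]
    simp only [List.foldl_cons, List.countP_cons]
    rw [ih]
    by_cases hx : x = none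
    · subst hx
      by_cases hj : s = j
      · subst hj; simp [PySem.Dict.getD_insert_self]
        ring
      · have hji : ¬ (j = s) := fun h => hj h.symm
        simp [hj, PySem.Dict.getD_insert, hji]
    · simp [hx]

theorem cfdCountE (row : List (Option Int)) :
    ∀ (jn : Nat) (s : Int),
    (PySem.List.enumerate row s).countP (fun p => p.1 == (s + jn) && p.2 == none)
      = if row.getD jn (some 0) = none then 1 else 0 := by
  induction row with
  | nil => intro jn s; simp [PySem.List.enumerate_nil]
  | cons x row ih =>
    intro jn s
    rw [PySem.List.enumerate_cons]
    rw [List.countP_cons]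
    cases jn with
    | zero =>
      have h0 : (PySem.List.enumerate row (s + 1)).countP (fun p => p.1 == (s + (0 : Nat)) && p.2 == none) = 0 := by
        apply List.countP_eq_zero.2
        intro p hp
        rcases (PySem.List.mem_enumerate_iff _ _ _).1 hp with ⟨k, hk, rfl⟩
        simp only [Bool.and_eq_true, beq_iff_eq]
        intro h; exact absurd h.1 (by push_cast; omega)
      rw [h0]
      by_cases hx : x = none <;> simp [hx]
    | succ jn =>
      have harr : (s + ((jn : Nat) + 1 : Nat) : Int) = (s + 1) + (jn : Nat) := by push_cast; ring
      rw [harr, ih jn (s + 1)]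
      have hne : ¬ ((s : Int) = (s + 1) + (jn : Nat)) := by omega
      simp [hne]

theorem cfdCountRow_getD (row : List (Option Int)) (cnt : PySem.Dict Int Int) (jn : Nat) :
    (cfdCountRow cnt row).getD (jn : Int) 0
      = cnt.getD (jn : Int) 0 + (if row.getD jn (some 0) = none then 1 else 0) := by
  unfold cfdCountRow
  rw [cfdCountRow_getD_aux row cnt 0 (jn : Int)]
  have := cfdCountE row jn 0
  rw [show ((0 : Int) + (jn : Nat)) = (jn : Int) by ring] at this
  rw [this]
  split_ifs <;> simp

theorem cfdFold_getD (rs : List (List (Option Int))) :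
    ∀ (cnt : PySem.Dict Int Int) (jn : Nat),
    (rs.foldl cfdCountRow cnt).getD (jn : Int) 0
      = cnt.getD (jn : Int) 0 + (rs.countP (fun r => r.getD jn (some 0) == none) : Int) := by
  induction rs with
  | nil => simp
  | cons r rs ih =>
    intro cnt jn
    simp only [List.foldl_cons, List.countP_cons]
    rw [ih, cfdCountRow_getD]
    simp
    ring

-- A's inner scan counts exactly the rows below whose j-th entry exists and is None (given Pre_)
theorem cfdRangeCount (l : List (List (Option Int))) (j : Nat) :
    ∀ (n a : Nat), a + n = l.length →
    (List.range' a n).countP (fun k => decide ((l.getD k []).getD j none = none))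
      = (l.drop a).countP (fun r => decide (r.getD j none = none)) := by
  intro n
  induction n with
  | zero =>
    intro a h
    rw [List.drop_of_length_le (show l.length ≤ a by omega)]
    simp
  | succ n ih =>
    intro a h
    have ha : a < l.length := by omega
    rw [List.range'_succ, List.countP_cons]
    have hd : l.drop a = l[a] :: l.drop (a + 1) := (List.getElem_cons_drop ha).symm
    rw [hd, List.countP_cons, ih (a + 1) (by omega), List.getD_eq_getElem l [] ha]

-- enumerate-fold over a list is the range-fold over its indices
theorem cfdEnumFold {α β : Type} (f : β → (Int × α) → β) (dflt : α) (xs : List α) :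
    ∀ (s : Int) (d : β),
    (PySem.List.enumerate xs s).foldl f d
      = (List.range xs.length).foldl (fun d i => f d (s + (i : Nat), xs.getD i dflt)) d := by
  induction xs with
  | nil => simp [PySem.List.enumerate_nil]
  | cons x xs ih =>
    intro s d
    rw [PySem.List.enumerate_cons, List.foldl_cons, ih (s + 1)]
    simp only [List.length_cons, List.range_succ_eq_map, List.foldl_cons, List.foldl_map]
    simp only [Nat.cast_zero, add_zero, List.getD_cons_zero]
    apply PySem.List.foldl_congr_mem
    intro acc i _
    simp only [Nat.succ_eq_add_one, List.getD_cons_succ]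
    have h1 : (s + ((i : Nat) + 1 : Nat) : Int) = s + 1 + (i : Nat) := by push_cast; ring
    rw [h1]

theorem calculate_fall_distances_spec : Claim_equal_calculate_fall_distances := by
  intro board _hdom hpre
  unfold Spec_calculate_fall_distances calculate_fall_distances calculate_fall_distances_alt
  rw [cfdSnaps_fold]
  simp only
  congr 1
  congr 1
  rw [cfdEnumFold _ ([] : List (Option Int)) board 0]
  apply PySem.List.foldl_congr_mem
  intro d i hi
  have hiR : i < board.length := by simpa using hi
  simp only [zero_add, Int.toNat_natCast]
  rw [cfdEnumFold _ (none : Option Int) (board.getD i []) 0]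
  apply PySem.List.foldl_congr_mem
  intro d' j hj
  have hjlen : j < (board.getD i []).length := by simpa using hj
  by_cases hc : (board.getD i []).getD j none = none
  · have hc' := hc
    simp only [List.getD_eq_getElem?_getD] at hc'
    simp [hc']
  · simp only [hc, ne_eq, not_false_iff, if_pos, zero_add]
    congr 1
    -- the values agree: A's rescan = B's snapshot lookup
    have hsnapsL : (cfdSnaps PySem.Dict.empty board.reverse).length = board.length := by
      rw [cfdSnaps_length]; simp
    have hgetD : ((cfdSnaps PySem.Dict.empty board.reverse).reverse).getD i PySem.Dict.empty
        = (board.reverse.take (board.length - 1 - i)).foldl cfdCountRow PySem.Dict.empty := by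
      rw [List.getD_reverse _ (by omega)]
      rw [hsnapsL]
      rw [cfdSnaps_getD _ _ _ (by simp; omega)]
    simp only [List.nil_append]
    rw [hgetD]
    have htake : board.reverse.take (board.length - 1 - i) = (board.drop (i + 1)).reverse := by
      rw [List.take_reverse, show board.length - (board.length - 1 - i) = i + 1 by omega]
    rw [htake]
    rw [cfdFold_getD]
    simp only [PySem.Dict.getD_empty, zero_add, List.countP_reverse]
    -- A's side
    rw [PySem.List.foldl_ite_add_one]
    rw [cfdRangeCount board j (board.length - (i + 1)) (i + 1) (by omega)]
    simp only [zero_add]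
    congr 1
    apply List.countP_congr
    intro r hr
    have hrlen : j < r.length := by
      rcases List.getElem_of_mem hr with ⟨t, ht, rfl⟩
      rw [List.getElem_drop]
      have hk : i + 1 + t < board.length := by
        have := List.length_drop (l := board) (i := i + 1); omega
      have := hpre i (by simpa using hiR) j (by simpa using hjlen)
        (by simpa using hc) (i + 1 + t) (by simpa using hk) (by omega)
      rwa [List.getD_eq_getElem board [] hk] at this
    rw [List.getD_eq_getElem r none hrlen, List.getD_eq_getElem r (some 0) hrlen]
    simp
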